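-- pv_equiv track=rewrite | github.com/sinarasouli79/weblog | extensions/utils.py | persian_digits_converter
-- ===== SOURCE A (Python) =====
-- def persian_digits_converter(number):
--     digits = {
--         '0' : "۰",
--         '1' : "۱",
--         '2' : "۲",
--         '3' : "۳",
--         '4' : "۴",
--         '5' : "۵",
--         '6' : "۶",
--         '7' : "۷",
--         '8' : "۸",
--         '9' : "۹",
--     }
--     for e,p in digits.items():
--         number = number.replace(e, p)
--
--     return number
-- ===== SOURCE B (Python) =====
-- def persian_digits_converter(number):
--     digits = {
--         '0' : "۰",
--         '1' : "۱",
--         '2' : "۲",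
--         '3' : "۳",
--         '4' : "۴",
--         '5' : "۵",
--         '6' : "۶",
--         '7' : "۷",
--         '8' : "۸",
--         '9' : "۹",
--     }
--     return ''.join(digits.get(c, c) for c in number)
-- ===== Notes on version B (the rewrite author's own statement) =====
-- stated objective: idiomatic
-- what changed: Replaced ten whole-string str.replace passes (one per digit) by a single pass over the characters, mapping each through the digit dict and joining.
import Mathlib
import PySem

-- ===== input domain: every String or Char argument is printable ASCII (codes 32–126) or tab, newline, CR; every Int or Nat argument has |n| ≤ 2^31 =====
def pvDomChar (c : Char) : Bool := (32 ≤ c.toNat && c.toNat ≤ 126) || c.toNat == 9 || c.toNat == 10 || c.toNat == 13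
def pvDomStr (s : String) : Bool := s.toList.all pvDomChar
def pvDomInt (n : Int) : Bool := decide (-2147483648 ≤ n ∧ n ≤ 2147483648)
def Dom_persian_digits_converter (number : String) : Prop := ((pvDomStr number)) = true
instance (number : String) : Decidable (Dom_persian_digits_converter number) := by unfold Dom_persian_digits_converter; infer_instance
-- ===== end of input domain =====

-- B replaces A's ten whole-string str.replace passes by one pass mapping each character
-- through the digit dict (idiomatic single-pass rewrite; same result on the ASCII domain).

-- ===== PORT A =====
-- the dict literal, in insertion order; items() iterates it in this order
def pvDigitsA : PySem.Dict String String := PySem.Dict.ofList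
  [("0", "۰"), ("1", "۱"), ("2", "۲"), ("3", "۳"), ("4", "۴"),
   ("5", "۵"), ("6", "۶"), ("7", "۷"), ("8", "۸"), ("9", "۹")]

def persian_digits_converter (number : String) : String :=
  (PySem.Dict.items pvDigitsA).foldl (fun n ep => PySem.Str.replace n ep.1 ep.2) number

-- ===== PORT B =====
-- the same dict; the 1-char Python strings (dict keys/values and the chars of the
-- iterated string) are ported as Char, so ''.join(...) is String.ofList of the mapped list
def pvDigitsB : PySem.Dict Char Char := PySem.Dict.ofList
  [('0', '۰'), ('1', '۱'), ('2', '۲'), ('3', '۳'), ('4', '۴'),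
   ('5', '۵'), ('6', '۶'), ('7', '۷'), ('8', '۸'), ('9', '۹')]

def persian_digits_converter_alt (number : String) : String :=
  String.ofList (number.toList.map (fun c => PySem.Dict.getD pvDigitsB c c))

-- ===== PRECONDITION & SPEC =====
def Spec_persian_digits_converter (number : String) (out : String) : Prop := out = persian_digits_converter_alt number
instance (number : String) (out : String) : Decidable (Spec_persian_digits_converter number out) := by unfold Spec_persian_digits_converter; infer_instance

-- ===== CLAIM (what is proved, stated in full; the proofs are below) =====
def Claim_equal_persian_digits_converter : Prop := ∀ (number : String), Dom_persian_digits_converter number → Spec_persian_digits_converter number (persian_digits_converter number)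

-- ===== LEMMAS AND PROOFS =====

-- the per-character effect of one single-character replace pass
def stepFn (e p : Char) (c : Char) : Char := if c = e then p else c

-- single-character replace is a map over the characters
theorem replace_go_single (e p : Char) :
    ∀ (l : List Char) (fuel : Nat) (acc : List Char), l.length ≤ fuel →
      PySem.Chars.replace.go [e] [p] fuel l acc = acc.reverse ++ l.map (stepFn e p) := by
  intro l
  induction l with
  | nil =>
      intro fuel acc _
      cases fuel <;> simp [PySem.Chars.replace.go]
  | cons c t ih =>
      intro fuel acc hle
      cases fuel with
      | zero => simp at hle
      | succ f =>
          by_cases hc : e = c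
          · subst hc
            simp [PySem.Chars.replace.go, List.isPrefixOf, stepFn,
                  ih f _ (by simpa using hle)]
          · simp [PySem.Chars.replace.go, List.isPrefixOf, hc, Ne.symm hc, stepFn,
                  ih f _ (by simpa using hle)]

theorem replace_single (l : List Char) (e p : Char) :
    PySem.Chars.replace l [e] [p] = l.map (stepFn e p) := by
  simpa using replace_go_single e p l l.length [] le_rfl

-- per-character agreement of the ten passes with the dict lookup, on the ASCII domain
theorem charwise (c : Char) (h : pvDomChar c = true) :
    stepFn '9' '۹' (stepFn '8' '۸' (stepFn '7' '۷' (stepFn '6' '۶' (stepFn '5' '۵'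
      (stepFn '4' '۴' (stepFn '3' '۳' (stepFn '2' '۲' (stepFn '1' '۱'
      (stepFn '0' '۰' c)))))))))
      = PySem.Dict.getD pvDigitsB c c := by
  by_cases h0 : c = '0'; · subst h0; decide
  by_cases h1 : c = '1'; · subst h1; decide
  by_cases h2 : c = '2'; · subst h2; decide
  by_cases h3 : c = '3'; · subst h3; decide
  by_cases h4 : c = '4'; · subst h4; decide
  by_cases h5 : c = '5'; · subst h5; decide
  by_cases h6 : c = '6'; · subst h6; decide
  by_cases h7 : c = '7'; · subst h7; decide
  by_cases h8 : c = '8'; · subst h8; decide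
  by_cases h9 : c = '9'; · subst h9; decide
  have hi : PySem.Dict.items pvDigitsB =
      [('0', '۰'), ('1', '۱'), ('2', '۲'), ('3', '۳'), ('4', '۴'),
       ('5', '۵'), ('6', '۶'), ('7', '۷'), ('8', '۸'), ('9', '۹')] := rfl
  have e0 : ('0' == c) = false := by simp [Ne.symm h0]
  have e1 : ('1' == c) = false := by simp [Ne.symm h1]
  have e2 : ('2' == c) = false := by simp [Ne.symm h2]
  have e3 : ('3' == c) = false := by simp [Ne.symm h3]
  have e4 : ('4' == c) = false := by simp [Ne.symm h4]
  have e5 : ('5' == c) = false := by simp [Ne.symm h5]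
  have e6 : ('6' == c) = false := by simp [Ne.symm h6]
  have e7 : ('7' == c) = false := by simp [Ne.symm h7]
  have e8 : ('8' == c) = false := by simp [Ne.symm h8]
  have e9 : ('9' == c) = false := by simp [Ne.symm h9]
  simp [PySem.Dict.getD, PySem.Dict.get?, hi, List.find?, stepFn,
        e0, e1, e2, e3, e4, e5, e6, e7, e8, e9,
        h0, h1, h2, h3, h4, h5, h6, h7, h8, h9]

-- the ten map passes collapse into B's single dict-lookup map
theorem nested_maps (l : List Char) (h : ∀ c ∈ l, pvDomChar c = true) :
    (((((((((l.map (stepFn '0' '۰')).map (stepFn '1' '۱')).map (stepFn '2' '۲')).map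
      (stepFn '3' '۳')).map (stepFn '4' '۴')).map (stepFn '5' '۵')).map
      (stepFn '6' '۶')).map (stepFn '7' '۷')).map (stepFn '8' '۸')).map (stepFn '9' '۹')
      = l.map (fun c => PySem.Dict.getD pvDigitsB c c) := by
  induction l with
  | nil => rfl
  | cons c t ih =>
      simp only [List.map_cons]
      rw [charwise c (h c List.mem_cons_self),
          ih (fun d hd => h d (List.mem_cons_of_mem c hd))]

-- ===== VERDICT (by name: the statement is the Claim_ definition above) =====
theorem persian_digits_converter_spec : Claim_equal_persian_digits_converter := by
  intro number hdom
  unfold Spec_persian_digits_converter persian_digits_converter persian_digits_converter_alt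
  have hall : ∀ c ∈ number.toList, pvDomChar c = true := by
    simpa [Dom_persian_digits_converter, pvDomStr, List.all_eq_true] using hdom
  rw [← String.toList_inj]
  have hA : PySem.Dict.items pvDigitsA =
      [("0", "۰"), ("1", "۱"), ("2", "۲"), ("3", "۳"), ("4", "۴"),
       ("5", "۵"), ("6", "۶"), ("7", "۷"), ("8", "۸"), ("9", "۹")] := by decide
  rw [hA]
  simp only [List.foldl, PySem.Str.toList_replace,
    show ("0":String).toList = ['0'] from rfl, show ("1":String).toList = ['1'] from rfl,
    show ("2":String).toList = ['2'] from rfl, show ("3":String).toList = ['3'] from rfl,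
    show ("4":String).toList = ['4'] from rfl, show ("5":String).toList = ['5'] from rfl,
    show ("6":String).toList = ['6'] from rfl, show ("7":String).toList = ['7'] from rfl,
    show ("8":String).toList = ['8'] from rfl, show ("9":String).toList = ['9'] from rfl,
    show ("۰":String).toList = ['۰'] from rfl, show ("۱":String).toList = ['۱'] from rfl,
    show ("۲":String).toList = ['۲'] from rfl, show ("۳":String).toList = ['۳'] from rfl,
    show ("۴":String).toList = ['۴'] from rfl, show ("۵":String).toList = ['۵'] from rfl,
    show ("۶":String).toList = ['۶'] from rfl, show ("۷":String).toList = ['۷'] from rfl,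
    show ("۸":String).toList = ['۸'] from rfl, show ("۹":String).toList = ['۹'] from rfl]
  simp only [replace_single, String.toList_ofList]
  exact nested_maps number.toList hall
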